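-- pv_equiv track=rewrite | github.com/loma18/pdf-tools | pdf_bookmark_tool.py | is_same_family
-- ===== SOURCE A (Python) =====
-- from typing import List, Tuple, Dict, Optional
--
-- def is_same_family(numbers1: List[int], numbers2: List[int]) -> bool:
--     """
--     判断两个数字序列是否属于同一族群
--
--     Args:
--         numbers1: 第一个数字序列
--         numbers2: 第二个数字序列
--
--     Returns:
--         bool: 是否属于同一族群
--     """
--     if not numbers1 or not numbers2:
--         return False
--
--     # 如果两个序列的前缀相同，则属于同一族群
--     # 例如 [2,6,2,1,1] 和 [2,6,2,2] 都属于 [2,6,2] 族群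
--     min_len = min(len(numbers1), len(numbers2))
--     common_prefix_len = 0
--
--     for i in range(min_len):
--         if numbers1[i] == numbers2[i]:
--             common_prefix_len += 1
--         else:
--             break
--
--     # 如果公共前缀长度>=2，则认为是同族群
--     return common_prefix_len >= 2
-- ===== SOURCE B (Python) =====
-- def is_same_family(numbers1, numbers2):
--     return (len(numbers1) >= 2 and len(numbers2) >= 2
--             and numbers1[0] == numbers2[0] and numbers1[1] == numbers2[1])
-- ===== Notes on version B (the rewrite author's own statement) =====
-- stated objective: simpler
-- what changed: Replaced the common-prefix-counting loop (plus emptiness guard) with a single closed-form conjunction: both lists have length >= 2 and their first two elements agree.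
import Mathlib
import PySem

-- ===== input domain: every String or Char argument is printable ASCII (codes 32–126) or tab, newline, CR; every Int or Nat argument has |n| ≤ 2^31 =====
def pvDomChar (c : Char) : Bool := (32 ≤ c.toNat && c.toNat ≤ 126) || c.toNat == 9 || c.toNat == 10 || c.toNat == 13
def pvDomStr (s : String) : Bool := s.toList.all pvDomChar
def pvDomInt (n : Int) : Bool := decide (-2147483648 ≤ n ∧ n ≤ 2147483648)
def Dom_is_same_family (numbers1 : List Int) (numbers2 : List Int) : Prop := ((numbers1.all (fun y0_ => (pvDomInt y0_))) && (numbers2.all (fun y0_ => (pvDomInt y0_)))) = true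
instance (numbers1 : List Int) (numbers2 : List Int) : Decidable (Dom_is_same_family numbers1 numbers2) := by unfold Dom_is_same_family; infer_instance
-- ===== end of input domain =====

-- ===== PORT A =====
-- helper: the for-loop of A — count matching prefix, break at first mismatch
def commonPrefixLen : List Int → List Int → Int
  | x :: xs, y :: ys => if x == y then 1 + commonPrefixLen xs ys else 0
  | _, _ => 0

def is_same_family (numbers1 : List Int) (numbers2 : List Int) : Bool :=
  if numbers1 = [] ∨ numbers2 = [] then false
  else decide (2 ≤ commonPrefixLen numbers1 numbers2)

-- ===== PORT B =====
-- B: closed-form conjunction, no loop (simpler; return value only)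
def is_same_family_alt (numbers1 : List Int) (numbers2 : List Int) : Bool :=
  decide (2 ≤ numbers1.length) && decide (2 ≤ numbers2.length)
    && (numbers1.getD 0 0 == numbers2.getD 0 0) && (numbers1.getD 1 0 == numbers2.getD 1 0)

-- ===== PRECONDITION & SPEC =====
def Spec_is_same_family (numbers1 : List Int) (numbers2 : List Int) (out : Bool) : Prop := out = is_same_family_alt numbers1 numbers2
instance (numbers1 : List Int) (numbers2 : List Int) (out : Bool) : Decidable (Spec_is_same_family numbers1 numbers2 out) := by unfold Spec_is_same_family; infer_instance

-- ===== CLAIM (what is proved, stated in full; the proofs are below) =====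
def Claim_equal_is_same_family : Prop := ∀ (numbers1 : List Int) (numbers2 : List Int), Dom_is_same_family numbers1 numbers2 → Spec_is_same_family numbers1 numbers2 (is_same_family numbers1 numbers2)

-- ===== LEMMAS AND PROOFS =====

-- ===== VERDICT (by name: the statement is the Claim_ definition above) =====
theorem commonPrefixLen_nonneg (xs ys : List Int) : 0 ≤ commonPrefixLen xs ys := by
  induction xs generalizing ys with
  | nil => simp [commonPrefixLen]
  | cons x xs ih =>
    cases ys with
    | nil => simp [commonPrefixLen]
    | cons y ys =>
      simp only [commonPrefixLen]
      split
      · have := ih ys; omega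
      · omega

theorem is_same_family_spec : Claim_equal_is_same_family := by
  intro numbers1 numbers2 _
  unfold Spec_is_same_family is_same_family is_same_family_alt
  match numbers1, numbers2 with
  | [], _ => simp
  | _ :: _, [] => simp
  | [a], c :: d :: s => simp [commonPrefixLen]; split <;> simp
  | a :: b :: t, [c] =>
    simp [commonPrefixLen]
    split <;> simp
  | [a], [c] => simp [commonPrefixLen]; split <;> simp
  | a :: b :: t, c :: d :: s =>
    simp only [commonPrefixLen, List.getD, List.length_cons]
    have h := commonPrefixLen_nonneg t s
    by_cases hac : a = c <;> by_cases hbd : b = d <;>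
      simp [hac, hbd] <;> omega
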